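-- pv_equiv track=rewrite | github.com/adafieno/audiolibros | khipu-studio/py/characters/detect_characters.py | _infer_personality
-- ===== SOURCE A (Python) =====
-- from typing import Dict, List, Any
--
-- def _infer_personality(character: Dict[str, Any]) -> List[str]:
--     """Infer personality traits from character description."""
--     description = character.get("description", "").lower()
--     char_type = character.get("type", "").lower()
--     traits = []
--
--     # Type-based inference
--     if char_type == "narrator":
--         traits.extend(["observant", "analytical"])
--     elif char_type == "protagonist":
--         traits.extend(["determined", "complex"])
--     elif char_type == "antagonist":
--         traits.extend(["challenging", "compelling"])
--
--     # Description-based inference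
--     if any(word in description for word in ["young", "child", "kid"]):
--         traits.extend(["energetic", "curious"])
--     elif any(word in description for word in ["old", "elder", "mayor"]):
--         traits.extend(["wise", "experienced"])
--
--     if any(word in description for word in ["love", "romantic", "romance"]):
--         traits.extend(["passionate", "gentle"])
--     elif any(word in description for word in ["villain", "bad", "evil"]):
--         traits.extend(["cunning", "intimidating"])
--
--     return traits[:4] if traits else ["neutral", "balanced"]
-- ===== SOURCE B (Python) =====
-- from typing import Dict, List, Any
--
-- # Trait contributions indexed by feature value.
-- _TYPE = [[], ["observant", "analytical"], ["determined", "complex"],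
--          ["challenging", "compelling"]]
-- _AGE = [[], ["energetic", "curious"], ["wise", "experienced"]]
-- _ROM = [[], ["passionate", "gentle"], ["cunning", "intimidating"]]
--
-- # Precompute the final answer for every feature triple (36 states): runtime does
-- # no trait accumulation, truncation or defaulting, only classification + lookup.
-- _ANSWERS = {
--     (t, a, r): (_TYPE[t] + _AGE[a] + _ROM[r])[:4] or ["neutral", "balanced"]
--     for t in range(4) for a in range(3) for r in range(3)
-- }
--
-- def _type_idx(char_type: str) -> int:
--     return {"narrator": 1, "protagonist": 2, "antagonist": 3}.get(char_type, 0)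
--
-- def _hit(description: str, words: List[str]) -> bool:
--     return any(word in description for word in words)
--
-- def _age_idx(description: str) -> int:
--     if _hit(description, ["young", "child", "kid"]):
--         return 1
--     if _hit(description, ["old", "elder", "mayor"]):
--         return 2
--     return 0
--
-- def _rom_idx(description: str) -> int:
--     if _hit(description, ["love", "romantic", "romance"]):
--         return 1
--     if _hit(description, ["villain", "bad", "evil"]):
--         return 2
--     return 0
--
-- def _infer_personality(character: Dict[str, Any]) -> List[str]:
--     """Infer personality traits: classify into a feature triple, look up the answer."""
--     description = character.get("description", "").lower()
--     char_type = character.get("type", "").lower()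
--     return _ANSWERS[(_type_idx(char_type), _age_idx(description), _rom_idx(description))]
-- ===== Notes on version B (the rewrite author's own statement) =====
-- stated objective: alternative
-- what changed: B precomputes the complete answer for each of the 36 possible feature states (type index x age index x romance index) into a table once, and at runtime only classifies the input into a feature triple and returns the precomputed final list; A instead accumulates traits through staged if/elif extends and truncates/defaults at the end.
import Mathlib
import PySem

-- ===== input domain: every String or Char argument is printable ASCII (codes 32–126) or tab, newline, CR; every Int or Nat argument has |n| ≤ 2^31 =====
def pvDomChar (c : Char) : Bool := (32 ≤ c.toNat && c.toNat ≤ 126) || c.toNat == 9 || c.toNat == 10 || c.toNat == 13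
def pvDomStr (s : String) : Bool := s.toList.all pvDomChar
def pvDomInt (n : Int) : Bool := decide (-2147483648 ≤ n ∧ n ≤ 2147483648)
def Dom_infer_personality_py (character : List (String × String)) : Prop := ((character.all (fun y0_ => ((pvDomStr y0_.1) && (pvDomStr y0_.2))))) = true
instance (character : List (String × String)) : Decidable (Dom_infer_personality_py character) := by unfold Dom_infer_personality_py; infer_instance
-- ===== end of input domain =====

-- B replaces A's staged extend/truncate/default logic by classification into a feature
-- triple plus a precomputed table of all 36 final answers (objective: alternative).

-- ===== PORT A =====
def infer_personality_py (character : List (String × String)) : List String :=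
  let d := PySem.Dict.mk character
  let description := PySem.Str.lower (d.getD "description" "")
  let char_type := PySem.Str.lower (d.getD "type" "")
  let traits : List String := []
  let traits := if char_type == "narrator" then traits ++ ["observant", "analytical"]
    else if char_type == "protagonist" then traits ++ ["determined", "complex"]
    else if char_type == "antagonist" then traits ++ ["challenging", "compelling"]
    else traits
  let traits := if ["young", "child", "kid"].any (fun w => PySem.Str.isIn w description) then
      traits ++ ["energetic", "curious"]
    else if ["old", "elder", "mayor"].any (fun w => PySem.Str.isIn w description) then
      traits ++ ["wise", "experienced"]
    else traits
  let traits := if ["love", "romantic", "romance"].any (fun w => PySem.Str.isIn w description) then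
      traits ++ ["passionate", "gentle"]
    else if ["villain", "bad", "evil"].any (fun w => PySem.Str.isIn w description) then
      traits ++ ["cunning", "intimidating"]
    else traits
  if traits.isEmpty then ["neutral", "balanced"] else PySem.List.slice traits none (some 4)

-- ===== PORT B =====
def pvTYPE : List (List String) :=
  [[], ["observant", "analytical"], ["determined", "complex"], ["challenging", "compelling"]]
def pvAGE : List (List String) := [[], ["energetic", "curious"], ["wise", "experienced"]]
def pvROM : List (List String) := [[], ["passionate", "gentle"], ["cunning", "intimidating"]]

-- the dict comprehension building _ANSWERS; indices come from range so pyGet? never misses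
def pvAnswers : PySem.Dict (Int × Int × Int) (List String) :=
  PySem.Dict.mk <|
    (PySem.List.pyRange 0 4 1).flatMap fun t =>
      (PySem.List.pyRange 0 3 1).flatMap fun a =>
        (PySem.List.pyRange 0 3 1).map fun r =>
          ((t, a, r),
            (let l := ((PySem.List.pyGet? pvTYPE t).getD []) ++
                      ((PySem.List.pyGet? pvAGE a).getD []) ++
                      ((PySem.List.pyGet? pvROM r).getD [])
             let s := PySem.List.slice l none (some 4)
             if s.isEmpty then ["neutral", "balanced"] else s))

def pvTypeIdx (char_type : String) : Int :=
  (PySem.Dict.mk [("narrator", (1 : Int)), ("protagonist", 2), ("antagonist", 3)]).getD char_type 0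

def pvHit (description : String) (words : List String) : Bool :=
  words.any (fun w => PySem.Str.isIn w description)

def pvAgeIdx (description : String) : Int :=
  if pvHit description ["young", "child", "kid"] then 1
  else if pvHit description ["old", "elder", "mayor"] then 2
  else 0

def pvRomIdx (description : String) : Int :=
  if pvHit description ["love", "romantic", "romance"] then 1
  else if pvHit description ["villain", "bad", "evil"] then 2
  else 0

def infer_personality_py_alt (character : List (String × String)) : List String :=
  let d := PySem.Dict.mk character
  let description := PySem.Str.lower (d.getD "description" "")
  let char_type := PySem.Str.lower (d.getD "type" "")
  -- _ANSWERS[k]: the key is always present, so the KeyError branch is unreachable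
  (pvAnswers.get? (pvTypeIdx char_type, pvAgeIdx description, pvRomIdx description)).getD []

-- ===== PRECONDITION & SPEC =====
def Spec_infer_personality_py (character : List (String × String)) (out : List String) : Prop := out = infer_personality_py_alt character
instance (character : List (String × String)) (out : List String) : Decidable (Spec_infer_personality_py character out) := by unfold Spec_infer_personality_py; infer_instance

-- ===== CLAIM (what is proved, stated in full; the proofs are below) =====
def Claim_equal_infer_personality_py : Prop := ∀ (character : List (String × String)), Dom_infer_personality_py character → Spec_infer_personality_py character (infer_personality_py character)

-- ===== LEMMAS AND PROOFS =====
theorem pvTypeIdxCases (ct : String) : pvTypeIdx ct =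
    (if ct == "narrator" then 1 else if ct == "protagonist" then 2
     else if ct == "antagonist" then 3 else 0) := by
  by_cases h1 : ct = "narrator"
  · subst h1; rfl
  by_cases h2 : ct = "protagonist"
  · subst h2; rfl
  by_cases h3 : ct = "antagonist"
  · subst h3; rfl
  simp [pvTypeIdx, PySem.Dict.getD, PySem.Dict.get?, h1, h2, h3, Ne.symm h1, Ne.symm h2, Ne.symm h3]

-- the 36-state correspondence, fully Boolean, checked by evaluation
theorem pvTable (b1 b2 b3 d1 d2 d3 d4 : Bool) :
    (let traits : List String := []
     let traits := if b1 then traits ++ ["observant", "analytical"]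
       else if b2 then traits ++ ["determined", "complex"]
       else if b3 then traits ++ ["challenging", "compelling"]
       else traits
     let traits := if d1 then traits ++ ["energetic", "curious"]
       else if d2 then traits ++ ["wise", "experienced"]
       else traits
     let traits := if d3 then traits ++ ["passionate", "gentle"]
       else if d4 then traits ++ ["cunning", "intimidating"]
       else traits
     if traits.isEmpty then ["neutral", "balanced"] else PySem.List.slice traits none (some 4)) =
    (pvAnswers.get? ((if b1 then 1 else if b2 then 2 else if b3 then 3 else 0),
                     (if d1 then 1 else if d2 then 2 else 0),
                     (if d3 then 1 else if d4 then 2 else 0))).getD [] := by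
  revert b1 b2 b3 d1 d2 d3 d4; decide

theorem pvCore (description char_type : String) :
    (let traits : List String := []
     let traits := if char_type == "narrator" then traits ++ ["observant", "analytical"]
       else if char_type == "protagonist" then traits ++ ["determined", "complex"]
       else if char_type == "antagonist" then traits ++ ["challenging", "compelling"]
       else traits
     let traits := if ["young", "child", "kid"].any (fun w => PySem.Str.isIn w description) then
         traits ++ ["energetic", "curious"]
       else if ["old", "elder", "mayor"].any (fun w => PySem.Str.isIn w description) then
         traits ++ ["wise", "experienced"]
       else traits
     let traits := if ["love", "romantic", "romance"].any (fun w => PySem.Str.isIn w description) then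
         traits ++ ["passionate", "gentle"]
       else if ["villain", "bad", "evil"].any (fun w => PySem.Str.isIn w description) then
         traits ++ ["cunning", "intimidating"]
       else traits
     if traits.isEmpty then ["neutral", "balanced"] else PySem.List.slice traits none (some 4)) =
    (pvAnswers.get? (pvTypeIdx char_type, pvAgeIdx description, pvRomIdx description)).getD [] := by
  rw [pvTypeIdxCases]
  simp only [pvAgeIdx, pvRomIdx, pvHit]
  exact pvTable _ _ _ _ _ _ _

-- ===== VERDICT (by name: the statement is the Claim_ definition above) =====
theorem infer_personality_py_spec : Claim_equal_infer_personality_py := by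
  intro character _
  exact pvCore (PySem.Str.lower ((PySem.Dict.mk character).getD "description" ""))
    (PySem.Str.lower ((PySem.Dict.mk character).getD "type" ""))
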